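-- pv_equiv track=rewrite | github.com/toohandsome/fluxion | tools/harness/lib/model_contracts.py | is_weakly_connected
-- ===== SOURCE A (Python) =====
-- from collections import defaultdict, deque
--
-- def is_weakly_connected(node_ids, outgoing, incoming) -> bool:
--     node_ids = list(node_ids)
--     if not node_ids:
--         return True
--     visited = set()
--     queue = deque([node_ids[0]])
--     while queue:
--         current = queue.popleft()
--         if current in visited:
--             continue
--         visited.add(current)
--         for nxt in outgoing.get(current, []) + incoming.get(current, []):
--             if nxt not in visited:
--                 queue.append(nxt)
--     return len(visited) == len(node_ids)
-- ===== SOURCE B (Python) =====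
-- def is_weakly_connected(node_ids, outgoing, incoming) -> bool:
--     ids = list(node_ids)
--     if not ids:
--         return True
--     reached = {ids[0]}
--     while True:
--         frontier = set()
--         for u in reached:
--             for v in outgoing.get(u, []) + incoming.get(u, []):
--                 if v not in reached:
--                     frontier.add(v)
--         if not frontier:
--             return len(reached) == len(ids)
--         reached |= frontier
-- ===== Notes on version B (the rewrite author's own statement) =====
-- stated objective: alternative
-- what changed: Replaces the deque-based BFS with a round-based fixpoint closure: each round scans the whole reached set for new neighbours and merges the frontier until it is empty, with no queue and no visited-skip branch.
import Mathlib
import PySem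

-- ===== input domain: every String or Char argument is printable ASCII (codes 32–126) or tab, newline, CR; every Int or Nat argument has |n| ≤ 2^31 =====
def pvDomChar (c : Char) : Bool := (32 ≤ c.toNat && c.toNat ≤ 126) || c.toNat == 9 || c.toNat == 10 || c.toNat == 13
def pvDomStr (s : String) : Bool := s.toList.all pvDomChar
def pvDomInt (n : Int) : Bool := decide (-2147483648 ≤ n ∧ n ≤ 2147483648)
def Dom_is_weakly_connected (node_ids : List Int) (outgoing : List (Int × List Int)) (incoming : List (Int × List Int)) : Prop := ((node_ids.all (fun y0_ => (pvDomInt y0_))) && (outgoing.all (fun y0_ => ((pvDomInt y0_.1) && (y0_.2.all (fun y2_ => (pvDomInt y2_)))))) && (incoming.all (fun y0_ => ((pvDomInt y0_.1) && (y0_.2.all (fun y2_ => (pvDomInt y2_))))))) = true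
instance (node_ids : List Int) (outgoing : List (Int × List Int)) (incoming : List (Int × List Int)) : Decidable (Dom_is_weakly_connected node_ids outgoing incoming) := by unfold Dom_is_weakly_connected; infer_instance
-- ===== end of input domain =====

-- B replaces A's deque-based BFS by a round-based fixpoint closure (no queue, no visited-skip
-- branch); same return value, a different algorithm of similar cost.
-- Both ports use fuel only as a totality guard; the fuel is proved sufficient below.

-- outgoing.get(u, []) + incoming.get(u, [])   (shared verbatim by both Python sources)
def pvAdj (og ic : List (Int × List Int)) (u : Int) : List Int :=
  (PySem.Dict.mk og).getD u [] ++ (PySem.Dict.mk ic).getD u []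

-- all values appearing in either adjacency dict (used only to size the fuel)
def pvVals (og ic : List (Int × List Int)) : List Int :=
  og.flatMap (·.2) ++ ic.flatMap (·.2)

def pvUniv (og ic : List (Int × List Int)) (start : Int) : List Int :=
  PySem.Set.ofList (start :: pvVals og ic)

-- ===== PORT A =====
-- while queue: current = queue.popleft(); skip if visited; visit and enqueue unvisited neighbours
def bfsLoop (og ic : List (Int × List Int)) : Nat → List Int → PySem.Set Int → PySem.Set Int
  | 0, _, visited => visited
  | _ + 1, [], visited => visited
  | fuel + 1, current :: queue, visited =>
    if PySem.Set.contains visited current then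
      bfsLoop og ic fuel queue visited
    else
      let visited' := PySem.Set.add visited current
      bfsLoop og ic fuel
        (queue ++ (pvAdj og ic current).filter (fun v => ! PySem.Set.contains visited' v))
        visited'

def is_weakly_connected (node_ids : List Int) (outgoing : List (Int × List Int)) (incoming : List (Int × List Int)) : Bool :=
  match node_ids with
  | [] => true
  | start :: _ =>
    let fuel := 1 + (pvUniv outgoing incoming start).length * ((pvVals outgoing incoming).length + 1)
    let visited := bfsLoop outgoing incoming fuel [start] PySem.Set.empty
    PySem.Set.len visited == PySem.List.len node_ids

-- ===== PORT B =====
-- frontier = {v : neighbour of some reached u, v not reached}  (one whole-set round)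
def bRound (og ic : List (Int × List Int)) (reached : PySem.Set Int) : PySem.Set Int :=
  reached.foldl
    (fun fr u =>
      (pvAdj og ic u).foldl
        (fun fr v => if PySem.Set.contains reached v then fr else PySem.Set.add fr v) fr)
    PySem.Set.empty

-- while True: frontier = …; if not frontier: return len(reached) == len(ids); reached |= frontier
def bLoop (og ic : List (Int × List Int)) (n : Int) : Nat → PySem.Set Int → Bool
  | 0, reached => PySem.Set.len reached == n
  | fuel + 1, reached =>
    let fr := bRound og ic reached
    if fr = [] then PySem.Set.len reached == n
    else bLoop og ic n fuel (PySem.Set.union reached fr)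

def is_weakly_connected_alt (node_ids : List Int) (outgoing : List (Int × List Int)) (incoming : List (Int × List Int)) : Bool :=
  match node_ids with
  | [] => true
  | start :: _ =>
    bLoop outgoing incoming (PySem.List.len node_ids)
      ((pvUniv outgoing incoming start).length + 1)
      (PySem.Set.add PySem.Set.empty start)

-- ===== PRECONDITION & SPEC =====
def Spec_is_weakly_connected (node_ids : List Int) (outgoing : List (Int × List Int)) (incoming : List (Int × List Int)) (out : Bool) : Prop := out = is_weakly_connected_alt node_ids outgoing incoming
instance (node_ids : List Int) (outgoing : List (Int × List Int)) (incoming : List (Int × List Int)) (out : Bool) : Decidable (Spec_is_weakly_connected node_ids outgoing incoming out) := by unfold Spec_is_weakly_connected; infer_instance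

-- ===== CLAIM (what is proved, stated in full; the proofs are below) =====
def Claim_equal_is_weakly_connected : Prop := ∀ (node_ids : List Int) (outgoing : List (Int × List Int)) (incoming : List (Int × List Int)), Dom_is_weakly_connected node_ids outgoing incoming → Spec_is_weakly_connected node_ids outgoing incoming (is_weakly_connected node_ids outgoing incoming)

-- ===== LEMMAS AND PROOFS =====

-- one undirected-as-coded step and its reflexive-transitive closure
def pvReach (og ic : List (Int × List Int)) (s x : Int) : Prop :=
  Relation.ReflTransGen (fun a b => b ∈ pvAdj og ic a) s x

lemma getD_mk_le (d : List (Int × List Int)) (u : Int) :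
    ((PySem.Dict.mk d).getD u []).length ≤ (d.flatMap (·.2)).length ∧
    (∀ v, v ∈ (PySem.Dict.mk d).getD u [] → v ∈ d.flatMap (·.2)) := by
  induction d with
  | nil => simp [PySem.Dict.getD_eq_get?_getD, PySem.Dict.get?]
  | cons p rest ih =>
    rw [PySem.Dict.getD_eq_get?_getD] at *
    obtain ⟨p1, p2⟩ := p
    rw [PySem.Dict.get?_mk_cons]
    by_cases h : p1 == u
    · simp [h]
      intro v hv; exact Or.inl hv
    · simp [h] at *
      obtain ⟨ih1, ih2⟩ := ih
      refine ⟨by omega, ?_⟩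
      intro v hv; exact Or.inr (ih2 v hv)

lemma countP_le_of_imp {α : Type} (U : List α) (p q : α → Bool)
    (himp : ∀ a, q a = true → p a = true) : U.countP q ≤ U.countP p := by
  induction U with
  | nil => simp
  | cons a l ih =>
    rw [List.countP_cons, List.countP_cons]
    by_cases hq : q a = true
    · simp [hq, himp a hq]; omega
    · simp [hq]; omega

lemma countP_lt_of_mem {α : Type} (U : List α) (p q : α → Bool) {x : α}
    (hx : x ∈ U) (hqx : q x = false) (hpx : p x = true)
    (himp : ∀ a, q a = true → p a = true) : U.countP q < U.countP p := by
  induction U with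
  | nil => simp at hx
  | cons a l ih =>
    rw [List.countP_cons, List.countP_cons]
    rcases List.mem_cons.mp hx with h | h
    · subst h
      simp [hqx, hpx]
      have := countP_le_of_imp l p q himp
      omega
    · have := ih h
      by_cases hq : q a = true
      · simp [hq, himp a hq]; omega
      · simp [hq]; omega

lemma mem_adj_mem_vals {og ic : List (Int × List Int)} {u v : Int}
    (h : v ∈ pvAdj og ic u) : v ∈ pvVals og ic := by
  unfold pvAdj at h
  unfold pvVals
  rcases List.mem_append.mp h with h | h
  · exact List.mem_append.mpr (Or.inl ((getD_mk_le og u).2 v h))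
  · exact List.mem_append.mpr (Or.inr ((getD_mk_le ic u).2 v h))

lemma length_adj_le (og ic : List (Int × List Int)) (u : Int) :
    (pvAdj og ic u).length ≤ (pvVals og ic).length := by
  unfold pvAdj pvVals
  rw [List.length_append, List.length_append]
  have h1 := (getD_mk_le og u).1
  have h2 := (getD_mk_le ic u).1
  omega

-- main BFS characterization
lemma bfsLoop_spec (og ic : List (Int × List Int)) (s : Int) :
    ∀ (fuel : Nat) (queue : List Int) (visited : PySem.Set Int),
    visited.Nodup →
    (∀ x ∈ queue, x ∈ pvUniv og ic s) →
    (∀ x ∈ visited, pvReach og ic s x) →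
    (∀ x ∈ queue, pvReach og ic s x) →
    (∀ x ∈ visited, ∀ v ∈ pvAdj og ic x, v ∈ visited ∨ v ∈ queue) →
    fuel ≥ queue.length +
      ((pvUniv og ic s).countP (fun x => ! PySem.Set.contains visited x)) *
        ((pvVals og ic).length + 1) →
    (bfsLoop og ic fuel queue visited).Nodup ∧
    (∀ x ∈ visited, x ∈ bfsLoop og ic fuel queue visited) ∧
    (∀ x ∈ queue, x ∈ bfsLoop og ic fuel queue visited) ∧
    (∀ x ∈ bfsLoop og ic fuel queue visited, pvReach og ic s x) ∧
    (∀ x ∈ bfsLoop og ic fuel queue visited, ∀ v ∈ pvAdj og ic x,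
        v ∈ bfsLoop og ic fuel queue visited) := by
  intro fuel
  induction fuel with
  | zero =>
    intro queue visited hnd hqU hv hq hclosed hfuel
    have hqnil : queue = [] := by
      cases queue with
      | nil => rfl
      | cons a l => simp only [List.length_cons] at hfuel; omega
    subst hqnil
    refine ⟨hnd, fun x hx => hx, by simp, hv, ?_⟩
    intro x hx v hv'
    rcases hclosed x hx v hv' with h | h
    · exact h
    · simp at h
  | succ fuel ih =>
    intro queue visited hnd hqU hv hq hclosed hfuel
    cases queue with
    | nil =>
      refine ⟨hnd, fun x hx => hx, by simp, hv, ?_⟩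
      intro x hx v hv'
      rcases hclosed x hx v hv' with h | h
      · exact h
      · simp at h
    | cons current queue =>
      have hcurU : current ∈ pvUniv og ic s := hqU current List.mem_cons_self
      by_cases hc : PySem.Set.contains visited current = true
      · -- current already visited: skip
        have hcur : current ∈ visited := (PySem.Set.contains_iff visited current).mp hc
        have heq : bfsLoop og ic (fuel + 1) (current :: queue) visited
            = bfsLoop og ic fuel queue visited := by
          simp only [bfsLoop]
          rw [if_pos hc]
        rw [heq]
        obtain ⟨r1, r2, r3, r4, r5⟩ := ih queue visited hnd
          (fun x hx => hqU x (List.mem_cons_of_mem _ hx)) hv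
          (fun x hx => hq x (List.mem_cons_of_mem _ hx))
          (by
            intro x hx v hv'
            rcases hclosed x hx v hv' with h | h
            · exact Or.inl h
            · rcases List.mem_cons.mp h with rfl | h
              · exact Or.inl hcur
              · exact Or.inr h)
          (by simp only [List.length_cons] at hfuel; omega)
        refine ⟨r1, r2, ?_, r4, r5⟩
        intro x hx
        rcases List.mem_cons.mp hx with rfl | hx
        · exact r2 x hcur
        · exact r3 x hx
      · -- visit current
        have hcurnv : current ∉ visited := fun h => hc ((PySem.Set.contains_iff visited current).mpr h)
        have heq : bfsLoop og ic (fuel + 1) (current :: queue) visited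
            = bfsLoop og ic fuel
                (queue ++ (pvAdj og ic current).filter
                  (fun v => ! PySem.Set.contains (PySem.Set.add visited current) v))
                (PySem.Set.add visited current) := by
          simp only [bfsLoop]
          rw [if_neg hc]
        rw [heq]
        have hmemadd : ∀ y, y ∈ PySem.Set.add visited current ↔ y ∈ visited ∨ y = current :=
          fun y => PySem.Set.mem_add visited current y
        have hkdec : (pvUniv og ic s).countP
              (fun x => ! PySem.Set.contains (PySem.Set.add visited current) x)
            < (pvUniv og ic s).countP (fun x => ! PySem.Set.contains visited x) := by
          refine countP_lt_of_mem _ _ _ hcurU ?_ ?_ ?_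
          · simp
          · simpa using hcurnv
          · intro a ha
            simp at ha ⊢
            exact ha.1
        have hpush : ((pvAdj og ic current).filter
              (fun v => ! PySem.Set.contains (PySem.Set.add visited current) v)).length
            ≤ (pvVals og ic).length :=
          le_trans (List.length_filter_le _ _) (length_adj_le og ic current)
        obtain ⟨r1, r2, r3, r4, r5⟩ := ih
          (queue ++ (pvAdj og ic current).filter
            (fun v => ! PySem.Set.contains (PySem.Set.add visited current) v))
          (PySem.Set.add visited current)
          (PySem.Set.nodup_add visited current hnd)
          (by
            intro x hx
            rcases List.mem_append.mp hx with h | h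
            · exact hqU x (List.mem_cons_of_mem _ h)
            · exact (PySem.Set.mem_ofList _ x).mpr
                (List.mem_cons_of_mem _ (mem_adj_mem_vals (List.mem_of_mem_filter h))))
          (by
            intro x hx
            rcases (hmemadd x).mp hx with h | rfl
            · exact hv x h
            · exact hq x List.mem_cons_self)
          (by
            intro x hx
            rcases List.mem_append.mp hx with h | h
            · exact hq x (List.mem_cons_of_mem _ h)
            · exact Relation.ReflTransGen.tail (hq current List.mem_cons_self)
                (List.mem_of_mem_filter h))
          (by
            intro x hx v hv'
            rcases (hmemadd x).mp hx with h | rfl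
            · rcases hclosed x h v hv' with h2 | h2
              · exact Or.inl ((hmemadd v).mpr (Or.inl h2))
              · rcases List.mem_cons.mp h2 with rfl | h2
                · exact Or.inl ((hmemadd v).mpr (Or.inr rfl))
                · exact Or.inr (List.mem_append.mpr (Or.inl h2))
            · by_cases hcv : PySem.Set.contains (PySem.Set.add visited x) v = true
              · exact Or.inl ((PySem.Set.contains_iff _ v).mp hcv)
              · exact Or.inr (List.mem_append.mpr (Or.inr
                  (List.mem_filter.mpr ⟨hv', by simpa using hcv⟩))))
          (by
            have hmul : ((pvUniv og ic s).countP
                  (fun x => ! PySem.Set.contains (PySem.Set.add visited current) x) + 1)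
                  * ((pvVals og ic).length + 1)
                ≤ (pvUniv og ic s).countP (fun x => ! PySem.Set.contains visited x)
                  * ((pvVals og ic).length + 1) :=
              Nat.mul_le_mul_right _ hkdec
            simp only [List.length_cons] at hfuel
            rw [List.length_append]
            nlinarith [hpush, hfuel, hmul])
        refine ⟨r1, ?_, ?_, r4, r5⟩
        · intro x hx
          exact r2 x ((hmemadd x).mpr (Or.inl hx))
        · intro x hx
          rcases List.mem_cons.mp hx with rfl | hx
          · exact r2 x ((hmemadd x).mpr (Or.inr rfl))
          · exact r3 x (List.mem_append.mpr (Or.inl hx))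

lemma addFold_mem (reached : PySem.Set Int) (l : List Int) (fr0 : PySem.Set Int) (x : Int) :
    x ∈ l.foldl (fun fr v => if PySem.Set.contains reached v then fr else PySem.Set.add fr v) fr0 ↔
      (x ∈ fr0 ∨ (x ∈ l ∧ x ∉ reached)) := by
  induction l generalizing fr0 with
  | nil => simp
  | cons v l ih =>
    simp only [List.foldl_cons]
    rw [ih]
    by_cases hv : PySem.Set.contains reached v = true
    · have hvm := (PySem.Set.contains_iff reached v).mp hv
      rw [if_pos hv]; simp only [List.mem_cons]
      constructor
      · rintro (h | h)
        · exact Or.inl h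
        · exact Or.inr ⟨Or.inr h.1, h.2⟩
      · rintro (h | ⟨(rfl | h), hn⟩)
        · exact Or.inl h
        · exact absurd hvm hn
        · exact Or.inr ⟨h, hn⟩
    · have hvm := fun h => hv ((PySem.Set.contains_iff reached v).mpr h)
      rw [if_neg hv]; simp only [List.mem_cons]
      rw [show (x ∈ PySem.Set.add fr0 v) ↔ _ from PySem.Set.mem_add fr0 v x]
      constructor
      · rintro ((h | rfl) | h)
        · exact Or.inl h
        · exact Or.inr ⟨Or.inl rfl, hvm⟩
        · exact Or.inr ⟨Or.inr h.1, h.2⟩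
      · rintro (h | ⟨(rfl | h), hn⟩)
        · exact Or.inl (Or.inl h)
        · exact Or.inl (Or.inr rfl)
        · exact Or.inr ⟨h, hn⟩

lemma bRound_mem (og ic : List (Int × List Int)) (reached : PySem.Set Int) (x : Int) :
    x ∈ bRound og ic reached ↔
      ((∃ u ∈ reached, x ∈ pvAdj og ic u) ∧ x ∉ reached) := by
  unfold bRound
  have aux : ∀ (us : List Int) (fr0 : PySem.Set Int),
      x ∈ us.foldl (fun fr u => (pvAdj og ic u).foldl
        (fun fr v => if PySem.Set.contains reached v then fr else PySem.Set.add fr v) fr) fr0 ↔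
      (x ∈ fr0 ∨ ((∃ u ∈ us, x ∈ pvAdj og ic u) ∧ x ∉ reached)) := by
    intro us
    induction us with
    | nil => simp
    | cons u us ih =>
      intro fr0
      simp only [List.foldl_cons]
      rw [ih, addFold_mem]
      simp only [List.mem_cons]
      constructor
      · rintro ((h | h) | h)
        · exact Or.inl h
        · exact Or.inr ⟨⟨u, Or.inl rfl, h.1⟩, h.2⟩
        · obtain ⟨⟨w, hw, hx⟩, hn⟩ := h
          exact Or.inr ⟨⟨w, Or.inr hw, hx⟩, hn⟩
      · rintro (h | ⟨⟨w, (rfl | hw), hx⟩, hn⟩)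
        · exact Or.inl (Or.inl h)
        · exact Or.inl (Or.inr ⟨hx, hn⟩)
        · exact Or.inr ⟨⟨w, hw, hx⟩, hn⟩
  rw [aux]
  simp [PySem.Set.empty]

lemma bLoop_spec (og ic : List (Int × List Int)) (s : Int) (n : Int) :
    ∀ (fuel : Nat) (reached : PySem.Set Int),
    reached.Nodup →
    s ∈ reached →
    (∀ x ∈ reached, pvReach og ic s x) →
    fuel ≥ (pvUniv og ic s).countP (fun x => ! PySem.Set.contains reached x) + 1 →
    ∃ R : PySem.Set Int, bLoop og ic n fuel reached = (PySem.Set.len R == n) ∧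
      R.Nodup ∧ (∀ x, x ∈ R ↔ pvReach og ic s x) := by
  intro fuel
  induction fuel with
  | zero => intro reached _ _ _ hfuel; omega
  | succ fuel ih =>
    intro reached hnd hs hsound hfuel
    by_cases hfr : bRound og ic reached = []
    · refine ⟨reached, ?_, hnd, ?_⟩
      · simp only [bLoop]
        rw [if_pos hfr]
      · intro x
        constructor
        · exact hsound x
        · intro hr
          induction hr with
          | refl => exact hs
          | tail h1 h2 ihm =>
            by_contra hc
            have hm := (bRound_mem og ic reached _).mpr ⟨⟨_, ihm, h2⟩, hc⟩
            rw [hfr] at hm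
            simp at hm
    · obtain ⟨x0, hx0⟩ := List.exists_mem_of_ne_nil _ hfr
      obtain ⟨⟨u0, hu0, hadj0⟩, hnr0⟩ := (bRound_mem og ic reached x0).mp hx0
      have hsub : ∀ y, y ∈ reached → y ∈ PySem.Set.union reached (bRound og ic reached) :=
        fun y hy => (PySem.Set.mem_union reached _ y).mpr (Or.inl hy)
      have hsound' : ∀ x ∈ PySem.Set.union reached (bRound og ic reached), pvReach og ic s x := by
        intro x hx
        rcases (PySem.Set.mem_union reached _ x).mp hx with h | h
        · exact hsound x h
        · obtain ⟨⟨u, hu, hadj⟩, _⟩ := (bRound_mem og ic reached x).mp h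
          exact Relation.ReflTransGen.tail (hsound u hu) hadj
      have hcnt : (pvUniv og ic s).countP
            (fun x => ! PySem.Set.contains (PySem.Set.union reached (bRound og ic reached)) x)
          < (pvUniv og ic s).countP (fun x => ! PySem.Set.contains reached x) := by
        apply countP_lt_of_mem (x := x0)
        · exact (PySem.Set.mem_ofList _ x0).mpr (List.mem_cons_of_mem _ (mem_adj_mem_vals hadj0))
        · simp
          intro _
          exact hx0
        · simpa using hnr0
        · intro a ha
          simp at ha ⊢
          exact ha.1
      obtain ⟨R, hR1, hR2, hR3⟩ := ih (PySem.Set.union reached (bRound og ic reached))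
        (PySem.Set.nodup_union reached _ hnd) (hsub s hs) hsound' (by omega)
      refine ⟨R, ?_, hR2, hR3⟩
      simp only [bLoop]
      rw [if_neg hfr]
      exact hR1

-- ===== VERDICT (by name: the statement is the Claim_ definition above) =====
lemma empty_countP (U : List Int) :
    U.countP (fun x => ! PySem.Set.contains (PySem.Set.empty : PySem.Set Int) x) = U.length := by
  rw [List.countP_eq_length]
  intro a _
  simp [PySem.Set.empty, PySem.Set.contains]

theorem is_weakly_connected_spec : Claim_equal_is_weakly_connected := by
  intro node_ids og ic _hdom
  unfold Spec_is_weakly_connected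
  cases node_ids with
  | nil => rfl
  | cons start rest =>
    -- characterize A's visited set
    obtain ⟨r1, r2, r3, r4, r5⟩ := bfsLoop_spec og ic start
      (1 + (pvUniv og ic start).length * ((pvVals og ic).length + 1)) [start] PySem.Set.empty
      (by simp [PySem.Set.empty])
      (by
        intro x hx
        rcases List.mem_cons.mp hx with rfl | h
        · exact (PySem.Set.mem_ofList _ x).mpr List.mem_cons_self
        · simp at h)
      (by intro x hx; simp [PySem.Set.empty] at hx)
      (by
        intro x hx
        rcases List.mem_cons.mp hx with rfl | h
        · exact Relation.ReflTransGen.refl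
        · simp at h)
      (by intro x hx; simp [PySem.Set.empty] at hx)
      (by rw [empty_countP]; simp)
    have hA : ∀ x, x ∈ bfsLoop og ic
        (1 + (pvUniv og ic start).length * ((pvVals og ic).length + 1)) [start] PySem.Set.empty
        ↔ pvReach og ic start x := by
      intro x
      constructor
      · exact r4 x
      · intro hr
        induction hr with
        | refl => exact r3 start List.mem_cons_self
        | tail h1 h2 ihm => exact r5 _ ihm _ h2
    -- characterize B's reached set
    obtain ⟨RB, hB1, hB2, hB3⟩ := bLoop_spec og ic start (PySem.List.len (start :: rest))
      ((pvUniv og ic start).length + 1) (PySem.Set.add PySem.Set.empty start)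
      (PySem.Set.nodup_add _ start (by simp [PySem.Set.empty]))
      ((PySem.Set.mem_add _ start start).mpr (Or.inr rfl))
      (by
        intro x hx
        rcases (PySem.Set.mem_add _ start x).mp hx with h | rfl
        · simp [PySem.Set.empty] at h
        · exact Relation.ReflTransGen.refl)
      (by
        have := List.countP_le_length
          (p := fun x => ! PySem.Set.contains (PySem.Set.add PySem.Set.empty start) x)
          (l := pvUniv og ic start)
        omega)
    have hlen : (bfsLoop og ic
        (1 + (pvUniv og ic start).length * ((pvVals og ic).length + 1)) [start]
        PySem.Set.empty).length = RB.length :=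
      List.Perm.length_eq ((List.perm_ext_iff_of_nodup r1 hB2).mpr
        (fun x => (hA x).trans (hB3 x).symm))
    simp only [is_weakly_connected, is_weakly_connected_alt]
    rw [hB1, PySem.Set.len_eq, PySem.Set.len_eq, hlen]
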